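-- pv_equiv track=rewrite | github.com/jaydeepmalvya02/LeetCode2025 | AggressiveCows.py | Aggressive
-- ===== SOURCE A (Python) =====
-- def Aggressive(arr,cows):
--     low=0
--     high=max(arr)-min(arr)
--     while low<=high:
--         mid=(low+high)//2
--         t=CanWePlace(arr,mid,cows)
--         if t:
--             low=mid+1
--         else:
--             high=mid-1
--     return high
--
-- def CanWePlace(arr,k,cows):
--     count=1
--     last=arr[0]
--     for i in range(1,len(arr)):
--         if arr[i]-last>=k:
--             count+=1
--             last=arr[i]
--     if count>=cows:
--         return True
--     else:
--         return False
-- ===== SOURCE B (Python) =====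
-- def Aggressive(arr, cows):
--     base = min(arr)
--     H = max(arr) - base
--
--     def feasible(k):
--         count = 1
--         last = arr[0]
--         for x in arr[1:]:
--             if x - last >= k:
--                 count += 1
--                 last = x
--         return count >= cows
--
--     if feasible(H):
--         return H
--     if not feasible(0):
--         return -1
--     # largest feasible gap lies in [0, H-1]; build it bit by bit (feasibility is monotone)
--     ans = 0
--     for b in range(H.bit_length() - 1, -1, -1):
--         t = ans + 2 ** b
--         if t < H and feasible(t):
--             ans = t
--     return ans
-- ===== Notes on version B (the rewrite author's own statement) =====
-- stated objective: alternative
-- what changed: The low/high interval binary search is replaced by a bit-by-bit (binary-lifting) construction of the largest feasible gap after two direct feasibility probes at H and 0, and the indexed greedy loop becomes a fold over arr[1:]; proving them equal needs the monotonicity of the greedy feasibility in the gap.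
import Mathlib
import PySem

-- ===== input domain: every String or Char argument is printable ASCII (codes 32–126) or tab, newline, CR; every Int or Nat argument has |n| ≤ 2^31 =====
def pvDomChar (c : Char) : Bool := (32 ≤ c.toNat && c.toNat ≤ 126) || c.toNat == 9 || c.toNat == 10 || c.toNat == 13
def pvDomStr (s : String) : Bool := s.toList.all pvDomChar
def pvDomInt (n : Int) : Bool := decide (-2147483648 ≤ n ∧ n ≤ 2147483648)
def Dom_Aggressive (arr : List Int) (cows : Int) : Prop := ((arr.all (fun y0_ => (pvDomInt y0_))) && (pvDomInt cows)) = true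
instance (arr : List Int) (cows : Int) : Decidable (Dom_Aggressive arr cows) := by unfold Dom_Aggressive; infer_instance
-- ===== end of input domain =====

-- B replaces A's low/high interval binary search by a bit-by-bit construction of the answer
-- (and a feasibility helper folding over arr[1:] instead of an indexed loop); alternative, no speed claim.

-- ===== PORT A =====
-- CanWePlace(arr, k, cows): greedy count over range(1, len(arr)) with indexing, then count >= cows
def CanWePlaceA (arr : List Int) (k : Int) (cows : Int) : Bool :=
  let st := (PySem.List.pyRange 1 (PySem.List.len arr)).foldl
    (fun (s : Int × Int) i =>
      if PySem.List.pyGetD arr i 0 - s.2 ≥ k then (s.1 + 1, PySem.List.pyGetD arr i 0) else s)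
    (1, PySem.List.pyGetD arr 0 0)
  decide (cows ≤ st.1)

-- the 'while low <= high' loop of A; terminates because high + 1 - low strictly decreases
def bsearchA (arr : List Int) (cows : Int) (low high : Int) : Int :=
  if h : low ≤ high then
    let mid := PySem.Int.floordiv (low + high) 2
    if CanWePlaceA arr mid cows then bsearchA arr cows (mid + 1) high
    else bsearchA arr cows low (mid - 1)
  else high
termination_by (high + 1 - low).toNat
decreasing_by
  · have := PySem.Int.floordiv_two_mid_bounds h; omega
  · have := PySem.Int.floordiv_two_mid_bounds h; omega

def Aggressive (arr : List Int) (cows : Int) : Int :=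
  match arr with
  | [] => 0  -- dead branch: max([]) raises ValueError in Python; excluded by Pre_
  | _ :: _ =>
    bsearchA arr cows 0
      ((PySem.List.max? arr (fun x => x)).getD 0 - (PySem.List.min? arr (fun x => x)).getD 0)

-- ===== PORT B =====
-- Source B's closure 'feasible(k)': greedy count folding over arr[1:] (arr = a :: rest), then count >= cows
def canPlaceAlt (a : Int) (rest : List Int) (cows k : Int) : Bool :=
  decide (cows ≤ (rest.foldl (fun (s : Int × Int) x => if x - s.2 ≥ k then (s.1 + 1, x) else s) (1, a)).1)

-- Source B's 'for b in range(H.bit_length()-1, -1, -1)' loop; 2 ** b is ported as 2 ^ b.toNat,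
-- exact here since every b produced by the range is ≥ 0
def bitScan (a : Int) (rest : List Int) (cows H : Int) : Int :=
  (PySem.List.pyRange ((PySem.Int.bitLength H : Int) - 1) (-1) (-1)).foldl
    (fun ans b => let t := ans + 2 ^ b.toNat; if t < H ∧ canPlaceAlt a rest cows t then t else ans) 0

def Aggressive_alt (arr : List Int) (cows : Int) : Int :=
  match arr with
  | [] => 0  -- dead branch: min([]) raises ValueError in Python; excluded by Pre_
  | a :: rest =>
    let H := (PySem.List.max? arr (fun x => x)).getD 0 - (PySem.List.min? arr (fun x => x)).getD 0
    if canPlaceAlt a rest cows H then H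
    else if !canPlaceAlt a rest cows 0 then -1
    else bitScan a rest cows H

-- ===== PRECONDITION & SPEC =====
-- Python A raises ValueError (max of empty sequence) exactly on the empty list; B raises there too.
def Pre_Aggressive (arr : List Int) (_cows : Int) : Prop := arr ≠ []
instance (arr : List Int) (cows : Int) : Decidable (Pre_Aggressive arr cows) := by unfold Pre_Aggressive; infer_instance
def pvWitness_Aggressive : List Int × Int := ([0, 4, 9], 2)

def Spec_Aggressive (arr : List Int) (cows : Int) (out : Int) : Prop := out = Aggressive_alt arr cows
instance (arr : List Int) (cows : Int) (out : Int) : Decidable (Spec_Aggressive arr cows out) := by unfold Spec_Aggressive; infer_instance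

-- ===== CLAIM (what is proved, stated in full; the proofs are below) =====
def Claim_equal_Aggressive : Prop := ∀ (arr : List Int) (cows : Int), Dom_Aggressive arr cows → Pre_Aggressive arr cows → Spec_Aggressive arr cows (Aggressive arr cows)

-- ===== LEMMAS AND PROOFS =====

-- A's indexed greedy loop equals B's fold over the tail
lemma canPlace_eq (a : Int) (rest : List Int) (cows k : Int) :
    CanWePlaceA (a :: rest) k cows = canPlaceAlt a rest cows k := by
  unfold CanWePlaceA canPlaceAlt
  rw [PySem.List.foldl_pyRange_pyGetD (a := 1) (a :: rest) 0
    (fun (s : Int × Int) x => if x - s.2 ≥ k then (s.1 + 1, x) else s) _ (by norm_num)]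
  simp [PySem.List.pyGetD]

-- the two-run invariant: greedy with gap k (resp. k2 > k) run in lockstep from related states
def GInv (k k2 : Int) (s s2 : Int × Int) : Prop :=
  s2.1 ≤ s.1 ∧ (s2.1 = s.1 → s.2 ≤ s2.2 ∧ s.2 + k ≤ s2.2 + k2) ∧ (s2.1 < s.1 → s.2 < s2.2 + k2)

lemma greedy_inv (k k2 : Int) (hk2 : 0 < k2) (hkk : k ≤ k2) (rest : List Int) :
    ∀ (s s2 : Int × Int), GInv k k2 s s2 →
      GInv k k2
        (rest.foldl (fun (s : Int × Int) x => if x - s.2 ≥ k then (s.1 + 1, x) else s) s)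
        (rest.foldl (fun (s : Int × Int) x => if x - s.2 ≥ k2 then (s.1 + 1, x) else s) s2) := by
  induction rest with
  | nil => intro s s2 h; simpa using h
  | cons x xs ih =>
    intro s s2 h
    simp only [List.foldl_cons]
    apply ih
    obtain ⟨h1, h2, h3⟩ := h
    unfold GInv
    split_ifs with hp hq hq <;> simp_all <;> constructor <;> omega

-- feasibility is antitone in the gap (for gaps ≥ 0)
lemma canPlace_mono (a : Int) (rest : List Int) (cows : Int) {k k2 : Int}
    (hk : 0 ≤ k) (hkk : k ≤ k2) (h : canPlaceAlt a rest cows k2 = true) :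
    canPlaceAlt a rest cows k = true := by
  rcases eq_or_lt_of_le hkk with rfl | hlt
  · exact h
  · have := greedy_inv k k2 (by omega) hkk rest (1, a) (1, a) (by unfold GInv; simp; omega)
    unfold canPlaceAlt at *
    simp only [decide_eq_true_eq] at *
    have := this.1
    omega

-- the threshold: largest gap ≤ n that is feasible, else -1
def thrAux (f : Int → Bool) : Nat → Int
  | 0 => if f 0 then 0 else -1
  | n + 1 => if f ((n : Int) + 1) then (n : Int) + 1 else thrAux f n

lemma thrAux_le (f : Int → Bool) (n : Nat) : -1 ≤ thrAux f n ∧ thrAux f n ≤ (n : Int) := by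
  induction n with
  | zero => unfold thrAux; split <;> omega
  | succ m ih => unfold thrAux; split <;> push_cast <;> omega

lemma thrAux_feas (f : Int → Bool) (n : Nat) (h : 0 ≤ thrAux f n) : f (thrAux f n) = true := by
  induction n with
  | zero => unfold thrAux at *; split at h <;> simp_all
  | succ m ih =>
    by_cases hf : f ((m : Int) + 1) = true
    · simp [thrAux, hf]
    · simp only [thrAux, hf] at h ⊢
      exact ih h

lemma thrAux_gt (f : Int → Bool) (n : Nat) {k : Int} (h1 : thrAux f n < k) (h2 : k ≤ (n : Int)) :
    f k = false := by
  induction n with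
  | zero =>
    unfold thrAux at h1; split at h1
    · omega
    · interval_cases k
      · simp_all
  | succ m ih =>
    unfold thrAux at h1
    split at h1 <;> rename_i hf
    · omega
    · push_cast at h2
      rcases eq_or_lt_of_le h2 with rfl | hlt
      · simpa using hf
      · exact ih h1 (by omega)

-- characterisation: on [0, H], feasibility is exactly 'k ≤ threshold'
lemma char_thr (a : Int) (rest : List Int) (cows H : Int) (hH : 0 ≤ H) {k : Int}
    (hk : 0 ≤ k) (hkH : k ≤ H) :
    (canPlaceAlt a rest cows k = true ↔ k ≤ thrAux (canPlaceAlt a rest cows) H.toNat) := by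
  constructor
  · intro hf
    by_contra hlt
    push_neg at hlt
    have := thrAux_gt (canPlaceAlt a rest cows) H.toNat hlt (by omega)
    simp_all
  · intro hkT
    exact canPlace_mono a rest cows hk hkT
      (thrAux_feas _ _ (le_trans hk hkT))

-- A's binary search returns the threshold
lemma bsearch_eq_thr (a : Int) (rest : List Int) (cows H : Int) (hH : 0 ≤ H) :
    ∀ (n : Nat) (low high : Int), (high + 1 - low).toNat = n →
      0 ≤ low → low ≤ thrAux (canPlaceAlt a rest cows) H.toNat + 1 →
      thrAux (canPlaceAlt a rest cows) H.toNat ≤ high → high ≤ H →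
      bsearchA (a :: rest) cows low high = thrAux (canPlaceAlt a rest cows) H.toNat := by
  intro n
  induction n using Nat.strong_induction_on with
  | _ n ih =>
    intro low high hn h0 h1 h2 h3
    rw [bsearchA]
    by_cases hlh : low ≤ high
    · rw [dif_pos hlh]
      have hmid := PySem.Int.floordiv_two_mid_bounds hlh
      simp only [canPlace_eq]
      by_cases hf : canPlaceAlt a rest cows (PySem.Int.floordiv (low + high) 2) = true
      · rw [if_pos hf]
        have hmT := (char_thr a rest cows H hH (by omega) (by omega)).mp hf
        exact ih _ (by omega) _ high rfl (by omega) (by omega) h2 h3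
      · rw [if_neg hf]
        have hTm : thrAux (canPlaceAlt a rest cows) H.toNat < PySem.Int.floordiv (low + high) 2 := by
          by_contra hc
          push_neg at hc
          exact hf ((char_thr a rest cows H hH (by omega) (by omega)).mpr hc)
        exact ih _ (by omega) low _ rfl h0 h1 (by omega) (by omega)
    · rw [dif_neg hlh]
      omega

-- the downward range, unfolded one element
lemma pyRange_neg_cons (m : Int) (h : 0 ≤ m) :
    PySem.List.pyRange m (-1) (-1) = m :: PySem.List.pyRange (m - 1) (-1) (-1) := by
  simp only [PySem.List.pyRange]
  norm_num
  rcases eq_or_lt_of_le h with rfl | hpos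
  · norm_num
  · rw [if_pos (by omega), if_pos (by omega)]
    rw [show (m + 1).toNat = m.toNat + 1 by omega, List.range_succ_eq_map]
    simp only [List.map_cons, List.map_map]
    rw [List.cons.injEq]
    refine ⟨by norm_num, ?_⟩
    apply List.map_congr_left
    intro i _
    simp [Function.comp]
    omega

-- B's bit loop, peeled down from bit n-1: from any state ans with ans ≤ T < ans + 2^n it reaches T
lemma bitAux (a : Int) (rest : List Int) (cows H : Int) (hH : 0 ≤ H)
    (hTH : thrAux (canPlaceAlt a rest cows) H.toNat < H) :
    ∀ (n : Nat) (ans : Int), 0 ≤ ans → ans ≤ thrAux (canPlaceAlt a rest cows) H.toNat →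
      thrAux (canPlaceAlt a rest cows) H.toNat < ans + 2 ^ n →
      (PySem.List.pyRange ((n : Int) - 1) (-1) (-1)).foldl
        (fun ans b => let t := ans + 2 ^ b.toNat; if t < H ∧ canPlaceAlt a rest cows t then t else ans) ans
        = thrAux (canPlaceAlt a rest cows) H.toNat := by
  intro n
  induction n with
  | zero =>
    intro ans h0 h1 h2
    have : PySem.List.pyRange ((0 : Nat) - 1 : Int) (-1) (-1) = [] := by decide
    rw [this]
    simp only [List.foldl_nil]
    omega
  | succ m ih =>
    intro ans h0 h1 h2
    rw [show ((m + 1 : Nat) : Int) - 1 = (m : Int) by push_cast; ring,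
      pyRange_neg_cons (m : Int) (by positivity), List.foldl_cons]
    simp only [Int.toNat_natCast]
    by_cases hg : ans + 2 ^ m < H ∧ canPlaceAlt a rest cows (ans + 2 ^ m) = true
    · rw [if_pos hg]
      have ht := (char_thr a rest cows H hH (by positivity) (by omega)).mp hg.2
      exact ih (ans + 2 ^ m) (by positivity) ht (by ring_nf at h2 ⊢; omega)
    · rw [if_neg hg]
      have hTt : thrAux (canPlaceAlt a rest cows) H.toNat < ans + 2 ^ m := by
        by_cases hlt : ans + 2 ^ m < H
        · have hfeas : ¬ canPlaceAlt a rest cows (ans + 2 ^ m) = true := fun hc => hg ⟨hlt, hc⟩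
          by_contra hc
          push_neg at hc
          exact hfeas ((char_thr a rest cows H hH (by positivity) (by omega)).mpr hc)
        · omega
      exact ih ans h0 h1 hTt

-- ===== VERDICT (by name: the statement is the Claim_ definition above) =====
theorem Aggressive_spec : Claim_equal_Aggressive := by
  intro arr cows _ hpre
  unfold Spec_Aggressive
  cases arr with
  | nil => exact absurd rfl hpre
  | cons a rest =>
    cases hmx : PySem.List.max? (a :: rest) (fun x => x) with
    | none => exact absurd (((PySem.List.max?_eq_none_iff _ _).mp hmx)) (by simp)
    | some mx =>
    cases hmn : PySem.List.min? (a :: rest) (fun x => x) with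
    | none => exact absurd (((PySem.List.min?_eq_none_iff _ _).mp hmn)) (by simp)
    | some mn =>
    have hH : 0 ≤ mx - mn := by
      have h1 := PySem.List.max?_isMax hmx a (by simp)
      have h2 := PySem.List.min?_isMin hmn a (by simp)
      simp at h1 h2
      omega
    have hTle := thrAux_le (canPlaceAlt a rest cows) (mx - mn).toNat
    unfold Aggressive Aggressive_alt
    simp only [hmx, hmn, Option.getD_some]
    have hA : bsearchA (a :: rest) cows 0 (mx - mn)
        = thrAux (canPlaceAlt a rest cows) (mx - mn).toNat :=
      bsearch_eq_thr a rest cows (mx - mn) hH _ 0 (mx - mn) rfl le_rfl (by omega) (by omega) le_rfl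
    rw [hA]
    by_cases hfH : canPlaceAlt a rest cows (mx - mn) = true
    · rw [if_pos hfH]
      have := (char_thr a rest cows (mx - mn) hH hH le_rfl).mp hfH
      omega
    · rw [if_neg hfH]
      have hTH : thrAux (canPlaceAlt a rest cows) (mx - mn).toNat < mx - mn := by
        rcases eq_or_lt_of_le (by omega : thrAux (canPlaceAlt a rest cows) (mx - mn).toNat ≤ mx - mn) with heq | h
        · exact absurd ((char_thr a rest cows (mx - mn) hH hH le_rfl).mpr (by omega)) hfH
        · exact h
      by_cases hf0 : canPlaceAlt a rest cows 0 = true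
      · simp only [hf0, Bool.not_true, Bool.false_eq_true, if_false]
        have hT0 := (char_thr a rest cows (mx - mn) hH le_rfl hH).mp hf0
        exact (bitAux a rest cows (mx - mn) hH hTH (PySem.Int.bitLength (mx - mn)) 0 le_rfl hT0
          (by
            have hlt := PySem.Int.lt_two_pow_bitLength (mx - mn)
            have h1 : (((mx - mn).natAbs : Nat) : Int) < ((2 ^ PySem.Int.bitLength (mx - mn) : Nat) : Int) := by
              exact_mod_cast hlt
            have h3 : (((mx - mn).natAbs : Nat) : Int) = mx - mn := Int.natAbs_of_nonneg hH
            have h2 : ((2 ^ PySem.Int.bitLength (mx - mn) : Nat) : Int)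
                = 2 ^ PySem.Int.bitLength (mx - mn) := by push_cast; rfl
            omega)).symm
      · simp only [hf0, Bool.not_false, if_true]
        have : ¬ (0 : Int) ≤ thrAux (canPlaceAlt a rest cows) (mx - mn).toNat := by
          intro hc
          exact hf0 ((char_thr a rest cows (mx - mn) hH le_rfl hH).mpr hc)
        omega
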